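-- pv_equiv track=rewrite | github.com/Kyles45678/group-michael-lab7 | final_last_guess_attempt_senebouttarath.py | get_unique_possibilities
-- ===== SOURCE A (Python) =====
-- def get_unique_possibilities(possibles, word_length):
--     most_shared_set = set(range(word_length))
--     for c in possibles:
--         most_shared_set = most_shared_set.intersection(possibles[c])
--     c = possibles.copy()
--     for k in c:
--         c[k] = c[k].difference(most_shared_set)
--     return c
-- ===== SOURCE B (Python) =====
-- def get_unique_possibilities(possibles, word_length):
--     counts = {}
--     for v in possibles.values():
--         for x in v:
--             counts[x] = counts.get(x, 0) + 1
--     n = len(possibles)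
--     shared = {x for x, cnt in counts.items() if cnt == n and 0 <= x < word_length}
--     return {k: {x for x in v if x not in shared} for k, v in possibles.items()}
-- ===== Notes on version B (the rewrite author's own statement) =====
-- stated objective: alternative
-- what changed: Instead of materialising set(range(word_length)) and intersecting it pairwise with every value set, B makes one counting pass over all value sets and takes as shared the elements counted len(possibles) times that lie in [0, word_length); each returned set is rebuilt by filtering out the shared elements.
import Mathlib
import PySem

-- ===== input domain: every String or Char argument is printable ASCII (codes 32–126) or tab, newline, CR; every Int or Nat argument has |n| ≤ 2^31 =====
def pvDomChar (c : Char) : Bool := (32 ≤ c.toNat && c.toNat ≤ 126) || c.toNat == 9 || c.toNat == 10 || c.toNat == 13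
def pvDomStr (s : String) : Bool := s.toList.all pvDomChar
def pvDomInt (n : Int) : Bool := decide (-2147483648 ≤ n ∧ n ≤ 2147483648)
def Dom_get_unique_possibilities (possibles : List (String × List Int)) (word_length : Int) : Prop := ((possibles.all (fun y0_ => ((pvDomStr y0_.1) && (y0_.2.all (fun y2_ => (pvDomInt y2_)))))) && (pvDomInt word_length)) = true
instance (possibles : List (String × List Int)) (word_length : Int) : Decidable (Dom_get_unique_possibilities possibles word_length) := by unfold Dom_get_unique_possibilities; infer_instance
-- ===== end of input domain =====

-- B replaces A's materialised set(range(word_length)) and chain of pairwise intersections by one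
-- counting pass over the value sets plus a bounds filter (objective: alternative algorithm).

-- ===== PORT A =====
-- literal port of A: most_shared_set = set(range(word_length)), intersected with possibles[c] for
-- each key c; then copy the dict and replace each value by its difference with most_shared_set.
def get_unique_possibilities (possibles : List (String × List Int)) (word_length : Int) : List (String × List Int) :=
  let d := PySem.Dict.ofList possibles
  let most_shared_set : PySem.Set Int :=
    d.keys.foldl (fun acc c => PySem.Set.inter acc (d.getD c []))
      (PySem.Set.ofList (PySem.List.pyRange 0 word_length))
  let c := d.keys.foldl (fun c k => c.insert k (PySem.Set.diff (c.getD k []) most_shared_set)) d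
  c.items

-- ===== PORT B =====
-- literal port of Source B: count occurrences of each element across all value sets; shared = the
-- elements counted len(possibles) times that lie in [0, word_length); rebuild each set without them.
def get_unique_possibilities_alt (possibles : List (String × List Int)) (word_length : Int) : List (String × List Int) :=
  let d := PySem.Dict.ofList possibles
  let counts : PySem.Dict Int Int :=
    d.values.foldl (fun cnt v => v.foldl (fun cnt x => cnt.modify x 0 (· + 1)) cnt) PySem.Dict.empty
  let n : Int := (d.size : Int)
  let shared : PySem.Set Int :=
    PySem.Set.ofList
      ((counts.items.filter (fun p => p.2 == n && decide (0 ≤ p.1 ∧ p.1 < word_length))).map Prod.fst)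
  d.items.map (fun p => (p.1, PySem.Set.ofList (p.2.filter (fun x => !(PySem.Set.contains shared x)))))

-- ===== PRECONDITION & SPEC =====
-- Pre_ states the set-representation invariant of the input type: each value list holds the
-- DISTINCT elements of a Python set[int] (a list with duplicates represents no Python input).
def Pre_get_unique_possibilities (possibles : List (String × List Int)) (word_length : Int) : Prop :=
  ∀ p ∈ possibles, p.2.Nodup
instance (possibles : List (String × List Int)) (word_length : Int) : Decidable (Pre_get_unique_possibilities possibles word_length) := by unfold Pre_get_unique_possibilities; infer_instance
def pvWitness_get_unique_possibilities : (List (String × List Int)) × Int :=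
  ([("ab", [1, 2]), ("cd", [2, 0])], 3)
def Spec_get_unique_possibilities (possibles : List (String × List Int)) (word_length : Int) (out : List (String × List Int)) : Prop := out = get_unique_possibilities_alt possibles word_length
instance (possibles : List (String × List Int)) (word_length : Int) (out : List (String × List Int)) : Decidable (Spec_get_unique_possibilities possibles word_length out) := by unfold Spec_get_unique_possibilities; infer_instance

-- ===== CLAIM (what is proved, stated in full; the proofs are below) =====
def Claim_equal_get_unique_possibilities : Prop := ∀ (possibles : List (String × List Int)) (word_length : Int), Dom_get_unique_possibilities possibles word_length → Pre_get_unique_possibilities possibles word_length → Spec_get_unique_possibilities possibles word_length (get_unique_possibilities possibles word_length)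

-- ===== LEMMAS AND PROOFS =====

-- values of the deduplicated dict all come from the input association list
theorem pv_values_sub {d : PySem.Dict String (List Int)} {ps : List (String × List Int)} :
    ∀ p ∈ (d.update ps).items, p.2 ∈ d.values ∨ p.2 ∈ ps.map Prod.snd := by
  induction ps generalizing d with
  | nil => intro p hp; exact Or.inl (List.mem_map_of_mem hp)
  | cons q t ih =>
    intro p hp
    simp only [PySem.Dict.update, List.foldl_cons] at hp
    rcases ih (d := d.insert q.1 q.2) p hp with h | h
    · rcases PySem.Dict.mem_values_insert _ _ _ _ h with h' | h'
      · exact Or.inr (by simp [h'])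
      · exact Or.inl h'
    · exact Or.inr (by simp only [List.map_cons, List.mem_cons]; exact Or.inr h)

-- A's write-back loop rewrites each entry of the item list in place
theorem pv_foldl_insert (f : List Int → List Int) (l₂ l₁ : List (String × List Int))
    (h : ((l₁ ++ l₂).map Prod.fst).Nodup) :
    ((l₂.map Prod.fst).foldl
        (fun (c : PySem.Dict String (List Int)) k => c.insert k (f (c.getD k [])))
        (PySem.Dict.mk (l₁ ++ l₂))).items
      = l₁ ++ l₂.map (fun p => (p.1, f p.2)) := by
  induction l₂ generalizing l₁ with
  | nil => simp
  | cons q t ih =>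
    obtain ⟨k, v⟩ := q
    have h' := h
    simp only [List.map_append, List.map_cons, List.nodup_append, List.nodup_cons,
      List.mem_cons] at h'
    obtain ⟨hn1, ⟨hkt', hnt⟩, hdisj⟩ := h'
    have hk1 : ∀ p ∈ l₁, p.1 ≠ k := fun p hp =>
      hdisj p.1 (List.mem_map_of_mem hp) k (Or.inl rfl)
    have hkt : ∀ p ∈ t, p.1 ≠ k := fun p hp heq =>
      hkt' (heq ▸ List.mem_map_of_mem hp)
    have hget : (PySem.Dict.mk (l₁ ++ (k, v) :: t)).getD k [] = v := by
      simp only [PySem.Dict.getD, PySem.Dict.get?, List.find?_append]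
      have h1 : l₁.find? (fun p => p.1 == k) = none := by
        rw [List.find?_eq_none]; intro p hp; simpa using hk1 p hp
      simp [h1]
    have hcont : (PySem.Dict.mk (l₁ ++ (k, v) :: t)).contains k = true := by
      rw [PySem.Dict.contains_iff_mem_keys]
      simp [PySem.Dict.keys]
    have hins : ((PySem.Dict.mk (l₁ ++ (k, v) :: t)).insert k (f v)).items
        = (l₁ ++ [(k, f v)]) ++ t := by
      rw [PySem.Dict.items_insert_of_contains _ _ hcont]
      simp only [List.map_append, List.map_cons]
      have m1 : List.map (fun p => if (p.1 == k) = true then ((k, f v) : String × List Int) else p) l₁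
          = List.map id l₁ := List.map_congr_left (fun p hp => by simp [hk1 p hp])
      have m2 : List.map (fun p => if (p.1 == k) = true then ((k, f v) : String × List Int) else p) t
          = List.map id t := List.map_congr_left (fun p hp => by simp [hkt p hp])
      rw [m1, m2]; simp
    have hd : ((PySem.Dict.mk (l₁ ++ (k, v) :: t)).insert k (f v))
        = PySem.Dict.mk ((l₁ ++ [(k, f v)]) ++ t) := PySem.Dict.ext hins
    simp only [List.map_cons, List.foldl_cons]
    rw [hget, hd, ih (l₁ ++ [(k, f v)]) (by simpa using h)]
    simp

-- hence A's second loop maps (k, v) ↦ (k, v \ M) over the items, for any M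
theorem pv_A_items (d : PySem.Dict String (List Int)) (M : PySem.Set Int) (h : d.keys.Nodup) :
    (d.keys.foldl (fun c k => c.insert k (PySem.Set.diff (c.getD k []) M)) d).items
      = d.items.map (fun p => (p.1, PySem.Set.diff p.2 M)) := by
  have hk : ((([] : List (String × List Int)) ++ d.items).map Prod.fst).Nodup := by
    simpa [PySem.Dict.keys] using h
  have := pv_foldl_insert (fun v => PySem.Set.diff v M) d.items [] hk
  simpa [PySem.Dict.keys] using this

-- membership in A's iterated intersection
theorem pv_mem_fold_inter (g : String → List Int) (ks : List String) (init : PySem.Set Int) (x : Int) :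
    x ∈ ks.foldl (fun acc c => PySem.Set.inter acc (g c)) init ↔ x ∈ init ∧ ∀ k ∈ ks, x ∈ g k := by
  induction ks generalizing init with
  | nil => simp
  | cons k t ih =>
    simp only [List.foldl_cons, ih, PySem.Set.mem_inter, List.mem_cons]
    constructor
    · rintro ⟨⟨h1, h2⟩, h3⟩; exact ⟨h1, by rintro k' (rfl | hk'); exact h2; exact h3 k' hk'⟩
    · rintro ⟨h1, h2⟩; exact ⟨⟨h1, h2 k (Or.inl rfl)⟩, fun k' hk' => h2 k' (Or.inr hk')⟩

-- characterisation of A's most_shared_set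
theorem pv_mem_M (d : PySem.Dict String (List Int)) (wl x : Int) (hkeys : d.keys.Nodup) :
    x ∈ d.keys.foldl (fun acc c => PySem.Set.inter acc (d.getD c []))
        (PySem.Set.ofList (PySem.List.pyRange 0 wl))
      ↔ (0 ≤ x ∧ x < wl) ∧ ∀ p ∈ d.items, x ∈ p.2 := by
  rw [pv_mem_fold_inter, PySem.Set.mem_ofList, PySem.List.mem_pyRange_one]
  refine and_congr Iff.rfl ?_
  constructor
  · intro hk p hp
    have hmem : (p.1, p.2) ∈ d.items := hp
    have := PySem.Dict.get?_of_mem_items d hmem hkeys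
    have hg : d.getD p.1 [] = p.2 := by simp [PySem.Dict.getD, this]
    have : p.1 ∈ d.keys := by simp [PySem.Dict.keys]; exact ⟨p.2, hp⟩
    simpa [hg] using hk p.1 this
  · intro hp k hk
    simp only [PySem.Dict.keys, List.mem_map] at hk
    obtain ⟨p, hpm, rfl⟩ := hk
    have hmem : (p.1, p.2) ∈ d.items := hpm
    have := PySem.Dict.get?_of_mem_items d hmem hkeys
    have hg : d.getD p.1 [] = p.2 := by simp [PySem.Dict.getD, this]
    rw [hg]; exact hp p hpm

-- B's counter value at x = how many value sets contain x
theorem pv_counts_getD (vs : List (List Int)) (x : Int) (h : ∀ v ∈ vs, v.Nodup) :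
    (vs.foldl (fun cnt v => v.foldl (fun cnt x => cnt.modify x 0 (· + 1)) cnt)
        (PySem.Dict.empty : PySem.Dict Int Int)).getD x 0
      = ((vs.filter (fun v => x ∈ v)).length : Int) := by
  suffices H : ∀ (d : PySem.Dict Int Int),
      (vs.foldl (fun cnt v => v.foldl (fun cnt x => cnt.modify x 0 (· + 1)) cnt) d).getD x 0
        = d.getD x 0 + ((vs.filter (fun v => x ∈ v)).length : Int) by
    simpa using H PySem.Dict.empty
  induction vs with
  | nil => intro d; simp
  | cons v t ih =>
    intro d
    have hv : v.Nodup := h v (List.mem_cons_self ..)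
    have ht : ∀ w ∈ t, w.Nodup := fun w hw => h w (List.mem_cons_of_mem _ hw)
    have ihh := (fun d => ih ht d)
    simp only [List.foldl_cons, ihh, PySem.Dict.getD_foldl_modify_add_one]
    have : v.count x = if x ∈ v then 1 else 0 := by
      by_cases hx : x ∈ v
      · simp [hx, List.count_eq_one_of_mem hv hx]
      · simp [hx, List.count_eq_zero_of_not_mem hx]
    by_cases hx : x ∈ v <;> simp [this, hx] <;> ring

theorem pv_counts_nodup_keys (vs : List (List Int)) :
    (vs.foldl (fun cnt v => v.foldl (fun cnt x => cnt.modify x 0 (· + 1)) cnt)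
        (PySem.Dict.empty : PySem.Dict Int Int)).keys.Nodup := by
  suffices H : ∀ (d : PySem.Dict Int Int), d.keys.Nodup →
      (vs.foldl (fun cnt v => v.foldl (fun cnt x => cnt.modify x 0 (· + 1)) cnt) d).keys.Nodup by
    exact H _ (PySem.Dict.nodup_keys_empty)
  induction vs with
  | nil => intro d hd; simpa
  | cons v t ih =>
    intro d hd
    refine ih _ ?_
    induction v generalizing d with
    | nil => simpa
    | cons a w ihw => exact ihw _ (PySem.Dict.nodup_keys_insert _ _ _ hd)

-- characterisation of B's shared set (on a nonempty dict with set-valued entries)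
theorem pv_mem_shared (d : PySem.Dict String (List Int)) (wl x : Int)
    (hvals : ∀ p ∈ d.items, p.2.Nodup) (hne : d.items ≠ []) :
    x ∈ PySem.Set.ofList
        (((d.values.foldl (fun cnt v => v.foldl (fun cnt x => cnt.modify x 0 (· + 1)) cnt)
              (PySem.Dict.empty : PySem.Dict Int Int)).items.filter
            (fun p => p.2 == (d.size : Int) && decide (0 ≤ p.1 ∧ p.1 < wl))).map Prod.fst)
      ↔ (0 ≤ x ∧ x < wl) ∧ ∀ p ∈ d.items, x ∈ p.2 := by
  set counts := (d.values.foldl (fun cnt v => v.foldl (fun cnt x => cnt.modify x 0 (· + 1)) cnt)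
      (PySem.Dict.empty : PySem.Dict Int Int)) with hc
  have hvnodup : ∀ v ∈ d.values, v.Nodup := by
    intro v hv
    simp only [PySem.Dict.values, List.mem_map] at hv
    obtain ⟨p, hp, rfl⟩ := hv
    exact hvals p hp
  have hgetD : counts.getD x 0 = (((d.values).filter (fun v => x ∈ v)).length : Int) :=
    pv_counts_getD _ _ hvnodup
  have hknodup : counts.keys.Nodup := pv_counts_nodup_keys _
  have hn : d.values.length = d.items.length := by simp [PySem.Dict.values]
  have hfull : counts.getD x 0 = (d.size : Int) ↔ ∀ p ∈ d.items, x ∈ p.2 := by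
    rw [hgetD]
    have : ((((d.values).filter (fun v => x ∈ v)).length : Int) = (d.size : Int))
        ↔ ((d.values).filter (fun v => x ∈ v)).length = d.size := Nat.cast_inj
    rw [this]
    rw [PySem.Dict.size, ← hn, ← List.countP_eq_length_filter, List.countP_eq_length]
    simp only [PySem.Dict.values, List.mem_map, decide_eq_true_eq]
    constructor
    · intro h p hp; exact h p.2 ⟨p, hp, rfl⟩
    · rintro h v ⟨p, hp, rfl⟩; exact h p hp
  rw [PySem.Set.mem_ofList]
  simp only [List.mem_map, List.mem_filter]
  constructor
  · rintro ⟨p, ⟨hpm, hcond⟩, rfl⟩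
    simp only [Bool.and_eq_true, beq_iff_eq, decide_eq_true_eq] at hcond
    have hget : counts.get? p.1 = some p.2 := PySem.Dict.get?_of_mem_items _ hpm hknodup
    have : counts.getD p.1 0 = p.2 := by simp [PySem.Dict.getD, hget]
    exact ⟨hcond.2, hfull.mp (by rw [this, hcond.1])⟩
  · rintro ⟨hb, hall⟩
    have hgd : counts.getD x 0 = (d.size : Int) := hfull.mpr hall
    have hpos : 0 < d.size := by
      rw [PySem.Dict.size]
      cases h : d.items with
      | nil => exact absurd h hne
      | cons a t => simp
    have hcontains : counts.contains x = true := by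
      by_contra hcf
      have : counts.contains x = false := by simpa using hcf
      have := PySem.Dict.getD_of_not_contains counts (0 : Int) this
      rw [this] at hgd
      omega
    have hxk : x ∈ counts.keys := (PySem.Dict.contains_iff_mem_keys _ _).mp hcontains
    simp only [PySem.Dict.keys, List.mem_map] at hxk
    obtain ⟨p, hpm, rfl⟩ := hxk
    have hget : counts.get? p.1 = some p.2 := PySem.Dict.get?_of_mem_items _ hpm hknodup
    have hv : counts.getD p.1 0 = p.2 := by simp [PySem.Dict.getD, hget]
    refine ⟨p, ⟨hpm, ?_⟩, rfl⟩
    simp only [Bool.and_eq_true, beq_iff_eq, decide_eq_true_eq]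
    exact ⟨by rw [← hv, hgd], hb⟩

-- ===== VERDICT (by name: the statement is the Claim_ definition above) =====
theorem get_unique_possibilities_spec : Claim_equal_get_unique_possibilities := by
  intro possibles word_length _hDom hPre
  unfold Spec_get_unique_possibilities
  unfold get_unique_possibilities get_unique_possibilities_alt
  set d := PySem.Dict.ofList possibles with hd
  have hkeys : d.keys.Nodup := PySem.Dict.nodup_keys_ofList possibles
  have hvals : ∀ p ∈ d.items, p.2.Nodup := by
    intro p hp
    have hsub := pv_values_sub (d := PySem.Dict.empty) (ps := possibles) p hp
    rcases hsub with h | h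
    · simp [PySem.Dict.values, PySem.Dict.empty] at h
    · obtain ⟨q, hq, hqe⟩ := List.mem_map.mp h
      exact hqe ▸ hPre q hq
  rw [pv_A_items d _ hkeys]
  cases hl : d.items with
  | nil => simp [hl]
  | cons a t =>
    rw [← hl]
    apply List.map_congr_left
    intro p hp
    have hne : d.items ≠ [] := by rw [hl]; simp
    refine congrArg (fun w => (p.1, w)) ?_
    have hpn : p.2.Nodup := hvals p hp
    have hfn : (p.2.filter (fun x => !(PySem.Set.contains
        (PySem.Set.ofList
          (((d.values.foldl (fun cnt v => v.foldl (fun cnt x => cnt.modify x 0 (· + 1)) cnt)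
                (PySem.Dict.empty : PySem.Dict Int Int)).items.filter
              (fun p => p.2 == (d.size : Int) && decide (0 ≤ p.1 ∧ p.1 < word_length))).map Prod.fst)) x))).Nodup :=
      hpn.filter _
    rw [PySem.Set.ofList_eq_self_of_nodup _ hfn]
    show PySem.Set.diff p.2 _ = _
    unfold PySem.Set.diff
    apply List.filter_congr
    intro x _
    have hiff : (x ∈ d.keys.foldl (fun acc c => PySem.Set.inter acc (d.getD c []))
          (PySem.Set.ofList (PySem.List.pyRange 0 word_length)))
        ↔ (x ∈ PySem.Set.ofList
          (((d.values.foldl (fun cnt v => v.foldl (fun cnt x => cnt.modify x 0 (· + 1)) cnt)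
                (PySem.Dict.empty : PySem.Dict Int Int)).items.filter
              (fun p => p.2 == (d.size : Int) && decide (0 ≤ p.1 ∧ p.1 < word_length))).map Prod.fst)) :=
      (pv_mem_M d word_length x hkeys).trans (pv_mem_shared d word_length x hvals hne).symm
    have : PySem.Set.contains (d.keys.foldl (fun acc c => PySem.Set.inter acc (d.getD c []))
          (PySem.Set.ofList (PySem.List.pyRange 0 word_length))) x
        = PySem.Set.contains (PySem.Set.ofList
          (((d.values.foldl (fun cnt v => v.foldl (fun cnt x => cnt.modify x 0 (· + 1)) cnt)
                (PySem.Dict.empty : PySem.Dict Int Int)).items.filter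
              (fun p => p.2 == (d.size : Int) && decide (0 ≤ p.1 ∧ p.1 < word_length))).map Prod.fst)) x := by
      rw [Bool.eq_iff_iff, PySem.Set.contains_iff, PySem.Set.contains_iff]
      exact hiff
    rw [this]
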